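-- pv_equiv track=rewrite | github.com/CJuice/DoIT_GISDataInspection_Project | UtilityClass.py | prevent_SQL_error
-- ===== SOURCE A (Python) =====
-- def prevent_SQL_error(field_names_list, field_objects_list):
--     """
--     Prevent a sql error by removing problematic fields and objects from lists.
--
--     Was getting a sql error "Attribute column not found [42S22:[Microsoft][ODBC Driver 13 for SQL Server][SQL
--     Server]Invalid column name 'AREA'.]" Needed to remove the problematic fields.
--     :param field_names_list: list of fields in feature class
--     :param field_objects_list: field objects in list from feature class
--     :return:
--     """
--     remove_these_fields = ["shape", "area", "len", "starea()", "stlength()"]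
--     field_names_list_for_mod = [name for name in field_names_list]
--     for field_name in field_names_list_for_mod:
--         if field_name.lower() in remove_these_fields:
--             index = field_names_list.index(field_name)
--             del field_names_list[index]
--             del field_objects_list[index]
--     return (field_names_list, field_objects_list)
-- ===== SOURCE B (Python) =====
-- def prevent_SQL_error(field_names_list, field_objects_list):
--     """Remove blacklisted fields (and the objects at the same positions) from both
--     lists in place, by positive filtering instead of repeated index()/del."""
--     remove_these_fields = ("shape", "area", "len", "starea()", "stlength()")
--     removed = [i for i, name in enumerate(field_names_list)
--                if name.lower() in remove_these_fields]
--     field_names_list[:] = [name for name in field_names_list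
--                            if name.lower() not in remove_these_fields]
--     field_objects_list[:] = [obj for i, obj in enumerate(field_objects_list)
--                              if i not in removed]
--     return (field_names_list, field_objects_list)
-- ===== Notes on version B (the rewrite author's own statement) =====
-- stated objective: simpler
-- what changed: Replaced A's destructive loop over a copy with repeated list.index() searches and paired del statements by one positive filtering pass: collect the blacklisted index positions once, then rewrite both lists in place (slice assignment) keeping names whose lowercase is not blacklisted and objects whose index was not blacklisted.
import Mathlib
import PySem

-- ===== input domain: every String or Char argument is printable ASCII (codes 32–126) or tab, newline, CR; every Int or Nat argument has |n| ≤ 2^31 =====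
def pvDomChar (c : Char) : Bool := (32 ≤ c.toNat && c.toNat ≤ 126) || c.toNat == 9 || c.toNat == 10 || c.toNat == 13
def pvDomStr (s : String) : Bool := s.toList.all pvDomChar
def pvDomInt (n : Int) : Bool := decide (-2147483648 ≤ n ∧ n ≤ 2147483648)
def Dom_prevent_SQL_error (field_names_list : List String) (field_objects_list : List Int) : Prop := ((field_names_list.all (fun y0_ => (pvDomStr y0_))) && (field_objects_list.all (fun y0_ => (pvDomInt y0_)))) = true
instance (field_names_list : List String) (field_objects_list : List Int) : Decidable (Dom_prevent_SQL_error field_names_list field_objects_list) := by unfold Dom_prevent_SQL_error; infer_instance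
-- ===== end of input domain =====

-- B replaces A's index()/del destructive loop by one positive filtering pass over
-- both lists (simpler); both mutate the argument lists in place to the same final
-- contents, and the equivalence proved here is about the returned pair.

-- ===== PORT A =====
def pvBlacklist : List String := ["shape", "area", "len", "starea()", "stlength()"]

def pvStepA (st : List String × List Int) (field_name : String) : List String × List Int :=
  if pvBlacklist.contains (PySem.Str.lower field_name) then
    match PySem.List.index? st.1 field_name with
    | some index => (st.1.eraseIdx index, st.2.eraseIdx index)
    | none => st   -- unreachable: field_name came from a copy of the list and one equal element remains per copy occurrence
  else st

def prevent_SQL_error (field_names_list : List String) (field_objects_list : List Int) : List String × List Int :=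
  -- field_names_list_for_mod is a copy of the input list; the fold's state is the mutated pair
  let field_names_list_for_mod := field_names_list.map (fun name => name)
  List.foldl pvStepA (field_names_list, field_objects_list) field_names_list_for_mod

-- ===== PORT B =====
def prevent_SQL_error_alt (field_names_list : List String) (field_objects_list : List Int) : List String × List Int :=
  let removed : List Int :=
    ((PySem.List.enumerate field_names_list 0).filter
        (fun p => pvBlacklist.contains (PySem.Str.lower p.2))).map (fun p => p.1)
  let names' := field_names_list.filter (fun name => !(pvBlacklist.contains (PySem.Str.lower name)))
  let objs' := ((PySem.List.enumerate field_objects_list 0).filter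
        (fun p => !(removed.contains p.1))).map (fun p => p.2)
  (names', objs')

-- ===== PRECONDITION & SPEC =====
-- Pre_ excludes exactly the inputs where Python A raises IndexError: a blacklisted
-- name at an index not smaller than len(field_objects_list) makes 'del field_objects_list[index]' raise.
def Pre_prevent_SQL_error (field_names_list : List String) (field_objects_list : List Int) : Prop :=
  ∀ i : Nat, i < field_names_list.length →
    pvBlacklist.contains (PySem.Str.lower (field_names_list.getD i "")) = true →
    i < field_objects_list.length

instance (field_names_list : List String) (field_objects_list : List Int) : Decidable (Pre_prevent_SQL_error field_names_list field_objects_list) := by unfold Pre_prevent_SQL_error; infer_instance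

def pvWitness_prevent_SQL_error : List String × List Int := (["AREA", "name", "STLength()"], [1, 2, 3])

def Spec_prevent_SQL_error (field_names_list : List String) (field_objects_list : List Int) (out : List String × List Int) : Prop := out = prevent_SQL_error_alt field_names_list field_objects_list
instance (field_names_list : List String) (field_objects_list : List Int) (out : List String × List Int) : Decidable (Spec_prevent_SQL_error field_names_list field_objects_list out) := by unfold Spec_prevent_SQL_error; infer_instance

-- ===== CLAIM (what is proved, stated in full; the proofs are below) =====
def Claim_equal_prevent_SQL_error : Prop := ∀ (field_names_list : List String) (field_objects_list : List Int), Dom_prevent_SQL_error field_names_list field_objects_list → Pre_prevent_SQL_error field_names_list field_objects_list → Spec_prevent_SQL_error field_names_list field_objects_list (prevent_SQL_error field_names_list field_objects_list)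


-- ===== LEMMAS AND PROOFS =====

-- abbreviation used only by the proofs
def pvBl (s : String) : Bool := pvBlacklist.contains (PySem.Str.lower s)

-- common normal form of both ports' objects output: walk both lists together,
-- dropping the object where the name is blacklisted; extra objects are kept.
def pvF : List String → List Int → List Int
  | [], os => os
  | _ :: _, [] => []
  | n :: ns, o :: os => if pvBl n then pvF ns os else o :: pvF ns os

-- A's loop effect on the objects list, index-based
def pvEraseBl : List String → Nat → List Int → List Int
  | [], _, os => os
  | h :: t, k, os => if pvBl h then pvEraseBl t k (os.eraseIdx k) else pvEraseBl t (k + 1) os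

theorem pvF_nil_right : ∀ ns : List String, pvF ns [] = [] := by
  intro ns; cases ns <;> rfl

theorem pvL1 : ∀ (suf acc : List String) (os : List Int),
    (∀ s ∈ acc, pvBl s = false) →
    List.foldl pvStepA (acc ++ suf, os) suf
      = (acc ++ suf.filter (fun s => !pvBl s), pvEraseBl suf acc.length os) := by
  intro suf
  induction suf with
  | nil => intro acc os _; simp [pvEraseBl]
  | cons h t ih =>
    intro acc os hacc
    by_cases hb : pvBl h = true
    · have hnot : h ∉ acc := fun hm => by simp [hacc h hm] at hb
      have hidx : PySem.List.index? (acc ++ h :: t) h = some acc.length :=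
        (PySem.List.index?_eq_some_iff _ _ _).mpr ⟨acc, t, rfl, rfl, hnot⟩
      have hstep : pvStepA (acc ++ h :: t, os) h = (acc ++ t, os.eraseIdx acc.length) := by
        simp only [pvStepA, pvBl] at hb ⊢
        rw [if_pos hb]
        simp only [hidx]
        rw [List.eraseIdx_append_of_length_le (le_refl acc.length)]
        simp
      simp only [List.foldl_cons, hstep, ih acc _ hacc, List.filter_cons]
      simp [pvEraseBl, pvBl] at hb ⊢
      simp [hb]
    · have hb' : pvBl h = false := by simpa using hb
      have hstep : pvStepA (acc ++ h :: t, os) h = (acc ++ h :: t, os) := by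
        simp only [pvStepA, pvBl] at hb' ⊢
        have hnm : PySem.Str.lower h ∉ pvBlacklist := by simpa using hb'
        simp [hnm]
      have hacc' : ∀ s ∈ acc ++ [h], pvBl s = false := by
        intro s hs
        rcases List.mem_append.mp hs with h1 | h1
        · exact hacc s h1
        · simp at h1; subst h1; exact hb'
      have := ih (acc ++ [h]) os hacc'
      simp only [List.foldl_cons, hstep]
      rw [show acc ++ h :: t = (acc ++ [h]) ++ t by simp, this]
      simp [hb', pvEraseBl]

theorem pvL2 : ∀ (suf : List String) (k : Nat) (os : List Int),
    pvEraseBl suf k os = os.take k ++ pvF suf (os.drop k) := by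
  intro suf
  induction suf with
  | nil => intro k os; simp [pvEraseBl, pvF]
  | cons h t ih =>
    intro k os
    by_cases hk : k < os.length
    · have hdrop : os.drop k = os[k] :: os.drop (k + 1) := by
        rw [List.drop_eq_getElem_cons hk]
      by_cases hb : pvBl h = true
      · have h1 : pvEraseBl (h :: t) k os = pvEraseBl t k (os.eraseIdx k) := by
          simp [pvEraseBl, hb]
        have h2 : (os.eraseIdx k).drop k = os.drop (k + 1) := by
          rw [List.eraseIdx_eq_take_drop_succ,
              List.drop_append_of_le_length (by simp; omega)]
          simp
        have h3 : (os.eraseIdx k).take k = os.take k := by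
          rw [List.eraseIdx_eq_take_drop_succ,
              List.take_append_of_le_length (by simp; omega), List.take_take,
              Nat.min_self]
        rw [h1, ih, h2, h3, hdrop]
        simp [pvF, hb]
      · have hb' : pvBl h = false := by simpa using hb
        have h1 : pvEraseBl (h :: t) k os = pvEraseBl t (k + 1) os := by
          simp [pvEraseBl, hb']
        have h2 : os.take (k + 1) = os.take k ++ [os[k]] := by
          rw [List.take_add_one, List.getElem?_eq_getElem hk]; rfl
        rw [h1, ih, hdrop]
        simp only [pvF, hb', Bool.false_eq_true, if_false]
        rw [h2, List.append_assoc]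
        rfl
    · have hk' : os.length ≤ k := by omega
      have he : os.eraseIdx k = os := List.eraseIdx_of_length_le hk'
      have hd : os.drop k = [] := List.drop_eq_nil_of_le hk'
      have hd' : os.drop (k + 1) = [] := List.drop_eq_nil_of_le (by omega)
      have ht : os.take k = os := List.take_of_length_le hk'
      by_cases hb : pvBl h = true
      · have h1 : pvEraseBl (h :: t) k os = pvEraseBl t k os := by
          simp [pvEraseBl, hb, he]
        rw [h1, ih]
        simp [hd, ht, pvF_nil_right]
      · have hb' : pvBl h = false := by simpa using hb
        have h1 : pvEraseBl (h :: t) k os = pvEraseBl t (k + 1) os := by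
          simp [pvEraseBl, hb']
        rw [h1, ih]
        simp [hd, hd', List.take_of_length_le (show os.length ≤ k + 1 by omega), ht, pvF_nil_right]

def pvRemovedFrom (ns : List String) (s : Int) : List Int :=
  ((PySem.List.enumerate ns s).filter (fun p => pvBl p.2)).map (fun p => p.1)

theorem pvRemovedFrom_ge : ∀ (ns : List String) (s x : Int), x ∈ pvRemovedFrom ns s → s ≤ x := by
  intro ns s x hx
  simp only [pvRemovedFrom, List.mem_map, List.mem_filter] at hx
  obtain ⟨p, ⟨hmem, _⟩, hfst⟩ := hx
  obtain ⟨k, hk, rfl⟩ := (PySem.List.mem_enumerate_iff _ _ _).mp hmem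
  subst hfst
  show s ≤ s + (k : Int)
  omega

theorem pvLB : ∀ (ns : List String) (os : List Int) (s : Int),
    ((PySem.List.enumerate os s).filter (fun p => !((pvRemovedFrom ns s).contains p.1))).map (fun p => p.2)
      = pvF ns os := by
  intro ns
  induction ns with
  | nil =>
    intro os s
    have h0 : pvRemovedFrom [] s = [] := rfl
    simp [h0, pvF, PySem.List.map_snd_enumerate]
  | cons h t ih =>
    intro os s
    have hrem : pvRemovedFrom (h :: t) s
        = if pvBl h then s :: pvRemovedFrom t (s + 1) else pvRemovedFrom t (s + 1) := by
      simp only [pvRemovedFrom, PySem.List.enumerate_cons, List.filter_cons]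
      by_cases hb : pvBl h = true <;> simp [hb]
    cases os with
    | nil => simp [pvF_nil_right]
    | cons o r =>
      rw [PySem.List.enumerate_cons, List.filter_cons]
      have hcongr : ∀ p ∈ PySem.List.enumerate r (s + 1),
          (!((pvRemovedFrom (h :: t) s).contains p.1)) = (!((pvRemovedFrom t (s + 1)).contains p.1)) := by
        intro p hp
        obtain ⟨k, hk, rfl⟩ := (PySem.List.mem_enumerate_iff _ _ _).mp hp
        rw [hrem]
        by_cases hb : pvBl h = true
        · rw [if_pos hb]
          have hne : ((s + 1 + (k : Int) == s) = false) := by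
            simp only [beq_eq_false_iff_ne]; omega
          simp
          intro _
          omega
        · rw [if_neg hb]
      by_cases hb : pvBl h = true
      · have hs : (pvRemovedFrom (h :: t) s).contains s = true := by
          rw [hrem]; simp [hb]
        rw [hs, List.filter_congr hcongr]
        simp only [Bool.not_true, Bool.false_eq_true, if_false]
        rw [ih]
        simp [pvF, hb]
      · have hb' : pvBl h = false := by simpa using hb
        have hs : (pvRemovedFrom (h :: t) s).contains s = false := by
          rw [hrem, if_neg hb]
          simp only [List.contains_eq_mem, decide_eq_false_iff_not]
          intro hmem
          have := pvRemovedFrom_ge t (s + 1) s hmem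
          omega
        rw [hs, List.filter_congr hcongr]
        simp only [Bool.not_false, if_true, List.map_cons]
        rw [ih]
        simp [pvF, hb']

theorem pvPorts_eq : ∀ (ns : List String) (os : List Int),
    prevent_SQL_error ns os = prevent_SQL_error_alt ns os := by
  intro ns os
  have hA : prevent_SQL_error ns os = (ns.filter (fun s => !pvBl s), pvEraseBl ns 0 os) := by
    have := pvL1 ns [] os (by intro s hs; simp at hs)
    simpa [prevent_SQL_error, List.map_id'] using this
  have hB : prevent_SQL_error_alt ns os = (ns.filter (fun s => !pvBl s), pvF ns os) := by
    simp only [prevent_SQL_error_alt]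
    exact congrArg _ (pvLB ns os 0)
  rw [hA, hB, pvL2]
  simp

-- ===== VERDICT (by name: the statement is the Claim_ definition above) =====
theorem prevent_SQL_error_spec : Claim_equal_prevent_SQL_error := by
  intro ns os _ _
  unfold Spec_prevent_SQL_error
  exact pvPorts_eq ns os
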